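-- pv_equiv track=rewrite | github.com/kule1015/aoc-2023 | day-1/day-1.py | _parse_numbers_in_line
-- ===== SOURCE A (Python) =====
-- written_numbers: dict[str, int] = {"one": 1, "two": 2, "three": 3, "four": 4, "five": 5, "six": 6, "seven": 7, "eight": 8, "nine": 9}
--
-- def _parse_numbers_in_line(line: str, numbers_within_line: [int]) -> [int]:
--     if not line:
--         return numbers_within_line
--
--     if line[0].isdigit():
--         return _parse_numbers_in_line(line[1:], numbers_within_line + [int(line[0])])
--     elif line[:3] in written_numbers.keys():
--         return _parse_numbers_in_line(line[2:], numbers_within_line + [written_numbers[line[:3]]])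
--     elif line[:4] in written_numbers.keys():
--         return _parse_numbers_in_line(line[3:], numbers_within_line + [written_numbers[line[:4]]])
--     elif line[:5] in written_numbers.keys():
--         return _parse_numbers_in_line(line[4:], numbers_within_line + [written_numbers[line[:5]]])
--     else:
--         return _parse_numbers_in_line(line[1:], numbers_within_line)
-- ===== SOURCE B (Python) =====
-- written_numbers: dict[str, int] = {"one": 1, "two": 2, "three": 3, "four": 4, "five": 5, "six": 6, "seven": 7, "eight": 8, "nine": 9}
--
-- def _parse_numbers_in_line(line: str, numbers_within_line: [int]) -> [int]:
--     found = []
--     suffix = line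
--     while suffix:
--         if suffix[0].isdigit():
--             found.append(int(suffix[0]))
--         else:
--             for word, value in written_numbers.items():
--                 if suffix.startswith(word):
--                     found.append(value)
--                     break
--         suffix = suffix[1:]
--     return numbers_within_line + found
-- ===== Notes on version B (the rewrite author's own statement) =====
-- stated objective: simpler
-- what changed: A recurses on the string with variable-length jumps (consuming 1, 2, 3 or 4 chars depending on which prefix-slice of length 3/4/5 is a dict key) and threads the growing result list through every call; B is a plain iterative left-to-right scan that advances exactly one character per step, testing the digit and each spelled-out number with startswith at the current position, then appends the found tokens once at the end.
import Mathlib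
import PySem

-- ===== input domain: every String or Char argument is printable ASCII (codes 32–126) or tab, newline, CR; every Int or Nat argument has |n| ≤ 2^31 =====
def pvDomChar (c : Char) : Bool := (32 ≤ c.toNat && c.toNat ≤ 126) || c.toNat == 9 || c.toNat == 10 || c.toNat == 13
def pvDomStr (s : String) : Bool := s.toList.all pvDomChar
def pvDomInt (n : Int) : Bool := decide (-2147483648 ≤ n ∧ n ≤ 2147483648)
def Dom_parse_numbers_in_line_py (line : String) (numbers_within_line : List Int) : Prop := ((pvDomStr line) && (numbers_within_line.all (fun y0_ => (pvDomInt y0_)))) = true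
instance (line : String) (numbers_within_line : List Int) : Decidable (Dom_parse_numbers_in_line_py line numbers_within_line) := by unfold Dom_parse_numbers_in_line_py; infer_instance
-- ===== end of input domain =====

-- B replaces A's recursion with variable-length jumps by a plain one-character-at-a-time iterative scan (objective: simpler).

-- ===== PORT A =====
-- module constant: written_numbers = {"one": 1, ..., "nine": 9}
def written_numbers : PySem.Dict String Int :=
  ⟨[("one", 1), ("two", 2), ("three", 3), ("four", 4), ("five", 5),
    ("six", 6), ("seven", 7), ("eight", 8), ("nine", 9)]⟩

-- literal transliteration of _parse_numbers_in_line, on the code points of `line`.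
-- `int(line[0])` is guarded by isdigit and `written_numbers[line[:k]]` by the `in keys()` test,
-- so Python never raises there; `.getD 0` is exact under those guards.
def pvParseRecA : List Char → List Int → List Int
  | [], acc => acc                      -- if not line: return numbers_within_line
  | c :: rest, acc =>
    if PySem.Chars.isdigit c then       -- line[0].isdigit()
      pvParseRecA rest (acc ++ [(PySem.Int.ofChars? [c]).getD 0])
    else if (PySem.Dict.get? written_numbers (String.ofList (List.take 3 (c :: rest)))).isSome then
      pvParseRecA (List.drop 2 (c :: rest))
        (acc ++ [(PySem.Dict.get? written_numbers (String.ofList (List.take 3 (c :: rest)))).getD 0])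
    else if (PySem.Dict.get? written_numbers (String.ofList (List.take 4 (c :: rest)))).isSome then
      pvParseRecA (List.drop 3 (c :: rest))
        (acc ++ [(PySem.Dict.get? written_numbers (String.ofList (List.take 4 (c :: rest)))).getD 0])
    else if (PySem.Dict.get? written_numbers (String.ofList (List.take 5 (c :: rest)))).isSome then
      pvParseRecA (List.drop 4 (c :: rest))
        (acc ++ [(PySem.Dict.get? written_numbers (String.ofList (List.take 5 (c :: rest)))).getD 0])
    else
      pvParseRecA rest acc
  termination_by l _ => l.length
  decreasing_by all_goals simp [List.length_drop]

def parse_numbers_in_line_py (line : String) (numbers_within_line : List Int) : List Int :=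
  pvParseRecA line.toList numbers_within_line

-- ===== PORT B =====
-- token found by B's inner `for word, value in written_numbers.items(): if suffix.startswith(word): ... break`
def pvTokenB (l : List Char) : List Int :=
  match l with
  | [] => []
  | c :: _ =>
    if PySem.Chars.isdigit c then [(PySem.Int.ofChars? [c]).getD 0]
    else
      match (PySem.Dict.items written_numbers).find?
              (fun wv => PySem.Chars.startswith l wv.1.toList) with
      | some wv => [wv.2]
      | none => []

-- B's while loop: advance one char per step, accumulating `found`
def pvScanB : List Char → List Int → List Int
  | [], found => found
  | c :: rest, found => pvScanB rest (found ++ pvTokenB (c :: rest))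

def parse_numbers_in_line_py_alt (line : String) (numbers_within_line : List Int) : List Int :=
  numbers_within_line ++ pvScanB line.toList []

-- ===== PRECONDITION & SPEC =====
def Spec_parse_numbers_in_line_py (line : String) (numbers_within_line : List Int) (out : List Int) : Prop := out = parse_numbers_in_line_py_alt line numbers_within_line
instance (line : String) (numbers_within_line : List Int) (out : List Int) : Decidable (Spec_parse_numbers_in_line_py line numbers_within_line out) := by unfold Spec_parse_numbers_in_line_py; infer_instance

-- ===== CLAIM (what is proved, stated in full; the proofs are below) =====
def Claim_equal_parse_numbers_in_line_py : Prop := ∀ (line : String) (numbers_within_line : List Int), Dom_parse_numbers_in_line_py line numbers_within_line → Spec_parse_numbers_in_line_py line numbers_within_line (parse_numbers_in_line_py line numbers_within_line)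

-- ===== LEMMAS AND PROOFS =====

-- pure scan function: B's loop without the accumulator
def pvScanF : List Char → List Int
  | [] => []
  | c :: rest => pvTokenB (c :: rest) ++ pvScanF rest

theorem scanF_cons (c : Char) (rest : List Char) :
    pvScanF (c :: rest) = pvTokenB (c :: rest) ++ pvScanF rest := rfl

theorem pvScanB_eq (l : List Char) : ∀ found, pvScanB l found = found ++ pvScanF l := by
  induction l with
  | nil => intro found; simp [pvScanB, pvScanF]
  | cons c rest ih => intro found; simp [pvScanB, pvScanF, ih]

theorem pv_sw_take (l w : List Char) (h : PySem.Chars.startswith l w = true) :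
    l.take w.length = w := by
  rw [PySem.Chars.startswith, List.isPrefixOf_iff_prefix] at h
  obtain ⟨t, rfl⟩ := h
  simp

theorem pv_ofList_eq {a : List Char} {s : String} (h : (s == String.ofList a) = true) :
    a = s.toList := by
  have h' : s = String.ofList a := by exact beq_iff_eq.mp h
  have := congrArg String.toList h'
  simpa using this.symm

-- a word that is a key cannot start at `l` when the corresponding prefix-slice test failed
theorem pv_no_sw (l w : List Char)
    (hk : (PySem.Dict.get? written_numbers (String.ofList w)).isSome = true)
    (h : (PySem.Dict.get? written_numbers (String.ofList (l.take w.length))).isSome = false) :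
    PySem.Chars.startswith l w = false := by
  cases hval : PySem.Chars.startswith l w with
  | false => rfl
  | true =>
    rw [pv_sw_take l w hval] at h
    rw [hk] at h
    exact absurd h (by simp)

-- a shorter prefix-slice test already succeeds when a short key matches a longer slice
theorem pv_kill (l : List Char) (m n : Nat) (w : String) (hmn : w.toList.length ≤ m) (hm : m ≤ n)
    (hw : List.take n l = w.toList)
    (hk : (PySem.Dict.get? written_numbers w).isSome = true)
    (hneg : (PySem.Dict.get? written_numbers (String.ofList (List.take m l))).isSome = false) :
    False := by
  have h1 : List.take m l = w.toList := by
    have h2 : List.take m (List.take n l) = List.take m l := by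
      rw [List.take_take, min_eq_left hm]
    rw [← h2, hw, List.take_of_length_le hmn]
  rw [h1] at hneg
  have h3 : String.ofList w.toList = w := by simp
  rw [h3, hk] at hneg
  exact absurd hneg (by simp)

theorem pv_key3 (l : List Char)
    (h : (PySem.Dict.get? written_numbers (String.ofList (List.take 3 l))).isSome = true) :
    List.take 3 l = "one".toList ∨ List.take 3 l = "two".toList ∨ List.take 3 l = "six".toList := by
  have hlen : (List.take 3 l).length ≤ 3 := by simp
  simp only [written_numbers, PySem.Dict.get?_mk_cons] at h
  split_ifs at h with h1 h2 h3 h4 h5 h6 h7 h8 h9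
  · exact Or.inl (pv_ofList_eq h1)
  · exact Or.inr (Or.inl (pv_ofList_eq h2))
  · have := pv_ofList_eq h3; rw [this] at hlen; simp at hlen
  · have := pv_ofList_eq h4; rw [this] at hlen; simp at hlen
  · have := pv_ofList_eq h5; rw [this] at hlen; simp at hlen
  · exact Or.inr (Or.inr (pv_ofList_eq h6))
  · have := pv_ofList_eq h7; rw [this] at hlen; simp at hlen
  · have := pv_ofList_eq h8; rw [this] at hlen; simp at hlen
  · have := pv_ofList_eq h9; rw [this] at hlen; simp at hlen
  · simp [PySem.Dict.get?] at h

theorem pv_key4 (l : List Char)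
    (hn3 : (PySem.Dict.get? written_numbers (String.ofList (List.take 3 l))).isSome = false)
    (h : (PySem.Dict.get? written_numbers (String.ofList (List.take 4 l))).isSome = true) :
    List.take 4 l = "four".toList ∨ List.take 4 l = "five".toList ∨ List.take 4 l = "nine".toList := by
  have hlen : (List.take 4 l).length ≤ 4 := by simp
  simp only [written_numbers, PySem.Dict.get?_mk_cons] at h
  split_ifs at h with h1 h2 h3 h4 h5 h6 h7 h8 h9
  · exact (pv_kill l 3 4 "one" (by decide) (by omega) (pv_ofList_eq h1) (by decide) hn3).elim
  · exact (pv_kill l 3 4 "two" (by decide) (by omega) (pv_ofList_eq h2) (by decide) hn3).elim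
  · have := pv_ofList_eq h3; rw [this] at hlen; simp at hlen
  · exact Or.inl (pv_ofList_eq h4)
  · exact Or.inr (Or.inl (pv_ofList_eq h5))
  · exact (pv_kill l 3 4 "six" (by decide) (by omega) (pv_ofList_eq h6) (by decide) hn3).elim
  · have := pv_ofList_eq h7; rw [this] at hlen; simp at hlen
  · have := pv_ofList_eq h8; rw [this] at hlen; simp at hlen
  · exact Or.inr (Or.inr (pv_ofList_eq h9))
  · simp [PySem.Dict.get?] at h

theorem pv_key5 (l : List Char)
    (hn3 : (PySem.Dict.get? written_numbers (String.ofList (List.take 3 l))).isSome = false)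
    (hn4 : (PySem.Dict.get? written_numbers (String.ofList (List.take 4 l))).isSome = false)
    (h : (PySem.Dict.get? written_numbers (String.ofList (List.take 5 l))).isSome = true) :
    List.take 5 l = "three".toList ∨ List.take 5 l = "seven".toList ∨ List.take 5 l = "eight".toList := by
  simp only [written_numbers, PySem.Dict.get?_mk_cons] at h
  split_ifs at h with h1 h2 h3 h4 h5 h6 h7 h8 h9
  · exact (pv_kill l 3 5 "one" (by decide) (by omega) (pv_ofList_eq h1) (by decide) hn3).elim
  · exact (pv_kill l 3 5 "two" (by decide) (by omega) (pv_ofList_eq h2) (by decide) hn3).elim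
  · exact Or.inl (pv_ofList_eq h3)
  · exact (pv_kill l 4 5 "four" (by decide) (by omega) (pv_ofList_eq h4) (by decide) hn4).elim
  · exact (pv_kill l 4 5 "five" (by decide) (by omega) (pv_ofList_eq h5) (by decide) hn4).elim
  · exact (pv_kill l 3 5 "six" (by decide) (by omega) (pv_ofList_eq h6) (by decide) hn3).elim
  · exact Or.inr (Or.inl (pv_ofList_eq h7))
  · exact Or.inr (Or.inr (pv_ofList_eq h8))
  · exact (pv_kill l 4 5 "nine" (by decide) (by omega) (pv_ofList_eq h9) (by decide) hn4).elim
  · simp [PySem.Dict.get?] at h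

-- one-step unfolding lemmas for port A
theorem stepA_digit (c : Char) (rest : List Char) (acc : List Int)
    (h : PySem.Chars.isdigit c = true) :
    pvParseRecA (c :: rest) acc = pvParseRecA rest (acc ++ [(PySem.Int.ofChars? [c]).getD 0]) := by
  simp only [pvParseRecA]
  rw [if_pos h]

theorem stepA_w3 (c : Char) (rest : List Char) (acc : List Int)
    (hd : ¬ PySem.Chars.isdigit c = true)
    (h3 : (PySem.Dict.get? written_numbers (String.ofList (List.take 3 (c :: rest)))).isSome = true) :
    pvParseRecA (c :: rest) acc = pvParseRecA (List.drop 2 (c :: rest))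
      (acc ++ [(PySem.Dict.get? written_numbers (String.ofList (List.take 3 (c :: rest)))).getD 0]) := by
  simp only [pvParseRecA]
  rw [if_neg hd, if_pos h3]

theorem stepA_w4 (c : Char) (rest : List Char) (acc : List Int)
    (hd : ¬ PySem.Chars.isdigit c = true)
    (h3 : ¬ (PySem.Dict.get? written_numbers (String.ofList (List.take 3 (c :: rest)))).isSome = true)
    (h4 : (PySem.Dict.get? written_numbers (String.ofList (List.take 4 (c :: rest)))).isSome = true) :
    pvParseRecA (c :: rest) acc = pvParseRecA (List.drop 3 (c :: rest))
      (acc ++ [(PySem.Dict.get? written_numbers (String.ofList (List.take 4 (c :: rest)))).getD 0]) := by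
  simp only [pvParseRecA]
  rw [if_neg hd, if_neg h3, if_pos h4]

theorem stepA_w5 (c : Char) (rest : List Char) (acc : List Int)
    (hd : ¬ PySem.Chars.isdigit c = true)
    (h3 : ¬ (PySem.Dict.get? written_numbers (String.ofList (List.take 3 (c :: rest)))).isSome = true)
    (h4 : ¬ (PySem.Dict.get? written_numbers (String.ofList (List.take 4 (c :: rest)))).isSome = true)
    (h5 : (PySem.Dict.get? written_numbers (String.ofList (List.take 5 (c :: rest)))).isSome = true) :
    pvParseRecA (c :: rest) acc = pvParseRecA (List.drop 4 (c :: rest))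
      (acc ++ [(PySem.Dict.get? written_numbers (String.ofList (List.take 5 (c :: rest)))).getD 0]) := by
  simp only [pvParseRecA]
  rw [if_neg hd, if_neg h3, if_neg h4, if_pos h5]

theorem stepA_else (c : Char) (rest : List Char) (acc : List Int)
    (hd : ¬ PySem.Chars.isdigit c = true)
    (h3 : ¬ (PySem.Dict.get? written_numbers (String.ofList (List.take 3 (c :: rest)))).isSome = true)
    (h4 : ¬ (PySem.Dict.get? written_numbers (String.ofList (List.take 4 (c :: rest)))).isSome = true)
    (h5 : ¬ (PySem.Dict.get? written_numbers (String.ofList (List.take 5 (c :: rest)))).isSome = true) :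
    pvParseRecA (c :: rest) acc = pvParseRecA rest acc := by
  simp only [pvParseRecA]
  rw [if_neg hd, if_neg h3, if_neg h4, if_neg h5]
theorem tok_one (t : List Char) : pvTokenB ('o'::'n'::'e'::t) = [1] := by
  simp [pvTokenB, written_numbers, PySem.Chars.startswith, List.isPrefixOf, PySem.Chars.isdigit]

theorem tok_two (t : List Char) : pvTokenB ('t'::'w'::'o'::t) = [2] := by
  simp [pvTokenB, written_numbers, PySem.Chars.startswith, List.isPrefixOf, PySem.Chars.isdigit]

theorem tok_six (t : List Char) : pvTokenB ('s'::'i'::'x'::t) = [6] := by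
  simp [pvTokenB, written_numbers, PySem.Chars.startswith, List.isPrefixOf, PySem.Chars.isdigit]

theorem tok_four (t : List Char) : pvTokenB ('f'::'o'::'u'::'r'::t) = [4] := by
  simp [pvTokenB, written_numbers, PySem.Chars.startswith, List.isPrefixOf, PySem.Chars.isdigit]

theorem tok_five (t : List Char) : pvTokenB ('f'::'i'::'v'::'e'::t) = [5] := by
  simp [pvTokenB, written_numbers, PySem.Chars.startswith, List.isPrefixOf, PySem.Chars.isdigit]

theorem tok_nine (t : List Char) : pvTokenB ('n'::'i'::'n'::'e'::t) = [9] := by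
  simp [pvTokenB, written_numbers, PySem.Chars.startswith, List.isPrefixOf, PySem.Chars.isdigit]

theorem tok_three (t : List Char) : pvTokenB ('t'::'h'::'r'::'e'::'e'::t) = [3] := by
  simp [pvTokenB, written_numbers, PySem.Chars.startswith, List.isPrefixOf, PySem.Chars.isdigit]

theorem tok_seven (t : List Char) : pvTokenB ('s'::'e'::'v'::'e'::'n'::t) = [7] := by
  simp [pvTokenB, written_numbers, PySem.Chars.startswith, List.isPrefixOf, PySem.Chars.isdigit]

theorem tok_eight (t : List Char) : pvTokenB ('e'::'i'::'g'::'h'::'t'::t) = [8] := by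
  simp [pvTokenB, written_numbers, PySem.Chars.startswith, List.isPrefixOf, PySem.Chars.isdigit]

theorem tok_ee (t : List Char) : pvTokenB ('e'::'e'::t) = [] := by
  simp [pvTokenB, written_numbers, PySem.Chars.startswith, List.isPrefixOf, PySem.Chars.isdigit]

theorem tok_en (t : List Char) : pvTokenB ('e'::'n'::t) = [] := by
  simp [pvTokenB, written_numbers, PySem.Chars.startswith, List.isPrefixOf, PySem.Chars.isdigit]

theorem tok_ev (t : List Char) : pvTokenB ('e'::'v'::t) = [] := by
  simp [pvTokenB, written_numbers, PySem.Chars.startswith, List.isPrefixOf, PySem.Chars.isdigit]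

theorem tok_gh (t : List Char) : pvTokenB ('g'::'h'::t) = [] := by
  simp [pvTokenB, written_numbers, PySem.Chars.startswith, List.isPrefixOf, PySem.Chars.isdigit]

theorem tok_hr (t : List Char) : pvTokenB ('h'::'r'::t) = [] := by
  simp [pvTokenB, written_numbers, PySem.Chars.startswith, List.isPrefixOf, PySem.Chars.isdigit]

theorem tok_ht (t : List Char) : pvTokenB ('h'::'t'::t) = [] := by
  simp [pvTokenB, written_numbers, PySem.Chars.startswith, List.isPrefixOf, PySem.Chars.isdigit]

theorem tok_ig (t : List Char) : pvTokenB ('i'::'g'::t) = [] := by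
  simp [pvTokenB, written_numbers, PySem.Chars.startswith, List.isPrefixOf, PySem.Chars.isdigit]

theorem tok_in (t : List Char) : pvTokenB ('i'::'n'::t) = [] := by
  simp [pvTokenB, written_numbers, PySem.Chars.startswith, List.isPrefixOf, PySem.Chars.isdigit]

theorem tok_iv (t : List Char) : pvTokenB ('i'::'v'::t) = [] := by
  simp [pvTokenB, written_numbers, PySem.Chars.startswith, List.isPrefixOf, PySem.Chars.isdigit]

theorem tok_ix (t : List Char) : pvTokenB ('i'::'x'::t) = [] := by
  simp [pvTokenB, written_numbers, PySem.Chars.startswith, List.isPrefixOf, PySem.Chars.isdigit]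

theorem tok_ne (t : List Char) : pvTokenB ('n'::'e'::t) = [] := by
  simp [pvTokenB, written_numbers, PySem.Chars.startswith, List.isPrefixOf, PySem.Chars.isdigit]

theorem tok_ou (t : List Char) : pvTokenB ('o'::'u'::t) = [] := by
  simp [pvTokenB, written_numbers, PySem.Chars.startswith, List.isPrefixOf, PySem.Chars.isdigit]

theorem tok_re (t : List Char) : pvTokenB ('r'::'e'::t) = [] := by
  simp [pvTokenB, written_numbers, PySem.Chars.startswith, List.isPrefixOf, PySem.Chars.isdigit]

theorem tok_ur (t : List Char) : pvTokenB ('u'::'r'::t) = [] := by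
  simp [pvTokenB, written_numbers, PySem.Chars.startswith, List.isPrefixOf, PySem.Chars.isdigit]

theorem tok_ve (t : List Char) : pvTokenB ('v'::'e'::t) = [] := by
  simp [pvTokenB, written_numbers, PySem.Chars.startswith, List.isPrefixOf, PySem.Chars.isdigit]

theorem tok_wo (t : List Char) : pvTokenB ('w'::'o'::t) = [] := by
  simp [pvTokenB, written_numbers, PySem.Chars.startswith, List.isPrefixOf, PySem.Chars.isdigit]

theorem pvParseRecA_eq : ∀ (l : List Char) (acc : List Int),
    pvParseRecA l acc = acc ++ pvScanF l := by
  intro l acc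
  induction l, acc using pvParseRecA.induct with
  | case1 acc => simp [pvParseRecA, pvScanF]
  | case2 c rest acc h ih =>
    rw [stepA_digit _ _ _ h, ih]
    have htok : pvTokenB (c :: rest) = [(PySem.Int.ofChars? [c]).getD 0] := by
      simp [pvTokenB, h]
    rw [scanF_cons, htok]
    simp
  | case3 c rest acc hd h3 ih =>
    rcases pv_key3 _ h3 with htake | htake | htake
    · obtain ⟨t, ht⟩ : ∃ t, c :: rest = 'o'::'n'::'e'::t := ⟨List.drop 3 (c :: rest), by
        conv_lhs => rw [← List.take_append_drop 3 (c :: rest)]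
        rw [htake]
        rfl⟩
      injection ht with hc hrest
      subst hc; subst hrest
      rw [stepA_w3 _ _ _ hd h3, ih]
      have hv : (PySem.Dict.get? written_numbers (String.ofList (List.take 3 ('o'::'n'::'e'::t)))).getD 0 = (1 : Int) := by rfl
      have hdrop : List.drop 2 ('o'::'n'::'e'::t) = 'e'::t := rfl
      have hscan : pvScanF ('o'::'n'::'e'::t) = [(1 : Int)] ++ pvScanF ('e'::t) := by
        rw [scanF_cons, tok_one, scanF_cons, tok_ne]
        simp
      rw [hv, hdrop, hscan]
      simp
    · obtain ⟨t, ht⟩ : ∃ t, c :: rest = 't'::'w'::'o'::t := ⟨List.drop 3 (c :: rest), by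
        conv_lhs => rw [← List.take_append_drop 3 (c :: rest)]
        rw [htake]
        rfl⟩
      injection ht with hc hrest
      subst hc; subst hrest
      rw [stepA_w3 _ _ _ hd h3, ih]
      have hv : (PySem.Dict.get? written_numbers (String.ofList (List.take 3 ('t'::'w'::'o'::t)))).getD 0 = (2 : Int) := by rfl
      have hdrop : List.drop 2 ('t'::'w'::'o'::t) = 'o'::t := rfl
      have hscan : pvScanF ('t'::'w'::'o'::t) = [(2 : Int)] ++ pvScanF ('o'::t) := by
        rw [scanF_cons, tok_two, scanF_cons, tok_wo]
        simp
      rw [hv, hdrop, hscan]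
      simp
    · obtain ⟨t, ht⟩ : ∃ t, c :: rest = 's'::'i'::'x'::t := ⟨List.drop 3 (c :: rest), by
        conv_lhs => rw [← List.take_append_drop 3 (c :: rest)]
        rw [htake]
        rfl⟩
      injection ht with hc hrest
      subst hc; subst hrest
      rw [stepA_w3 _ _ _ hd h3, ih]
      have hv : (PySem.Dict.get? written_numbers (String.ofList (List.take 3 ('s'::'i'::'x'::t)))).getD 0 = (6 : Int) := by rfl
      have hdrop : List.drop 2 ('s'::'i'::'x'::t) = 'x'::t := rfl
      have hscan : pvScanF ('s'::'i'::'x'::t) = [(6 : Int)] ++ pvScanF ('x'::t) := by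
        rw [scanF_cons, tok_six, scanF_cons, tok_ix]
        simp
      rw [hv, hdrop, hscan]
      simp
  | case4 c rest acc hd h3 h4 ih =>
    rcases pv_key4 _ (by simpa using h3) h4 with htake | htake | htake
    · obtain ⟨t, ht⟩ : ∃ t, c :: rest = 'f'::'o'::'u'::'r'::t := ⟨List.drop 4 (c :: rest), by
        conv_lhs => rw [← List.take_append_drop 4 (c :: rest)]
        rw [htake]
        rfl⟩
      injection ht with hc hrest
      subst hc; subst hrest
      rw [stepA_w4 _ _ _ hd h3 h4, ih]
      have hv : (PySem.Dict.get? written_numbers (String.ofList (List.take 4 ('f'::'o'::'u'::'r'::t)))).getD 0 = (4 : Int) := by rfl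
      have hdrop : List.drop 3 ('f'::'o'::'u'::'r'::t) = 'r'::t := rfl
      have hscan : pvScanF ('f'::'o'::'u'::'r'::t) = [(4 : Int)] ++ pvScanF ('r'::t) := by
        rw [scanF_cons, tok_four, scanF_cons, tok_ou, scanF_cons, tok_ur]
        simp
      rw [hv, hdrop, hscan]
      simp
    · obtain ⟨t, ht⟩ : ∃ t, c :: rest = 'f'::'i'::'v'::'e'::t := ⟨List.drop 4 (c :: rest), by
        conv_lhs => rw [← List.take_append_drop 4 (c :: rest)]
        rw [htake]
        rfl⟩
      injection ht with hc hrest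
      subst hc; subst hrest
      rw [stepA_w4 _ _ _ hd h3 h4, ih]
      have hv : (PySem.Dict.get? written_numbers (String.ofList (List.take 4 ('f'::'i'::'v'::'e'::t)))).getD 0 = (5 : Int) := by rfl
      have hdrop : List.drop 3 ('f'::'i'::'v'::'e'::t) = 'e'::t := rfl
      have hscan : pvScanF ('f'::'i'::'v'::'e'::t) = [(5 : Int)] ++ pvScanF ('e'::t) := by
        rw [scanF_cons, tok_five, scanF_cons, tok_iv, scanF_cons, tok_ve]
        simp
      rw [hv, hdrop, hscan]
      simp
    · obtain ⟨t, ht⟩ : ∃ t, c :: rest = 'n'::'i'::'n'::'e'::t := ⟨List.drop 4 (c :: rest), by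
        conv_lhs => rw [← List.take_append_drop 4 (c :: rest)]
        rw [htake]
        rfl⟩
      injection ht with hc hrest
      subst hc; subst hrest
      rw [stepA_w4 _ _ _ hd h3 h4, ih]
      have hv : (PySem.Dict.get? written_numbers (String.ofList (List.take 4 ('n'::'i'::'n'::'e'::t)))).getD 0 = (9 : Int) := by rfl
      have hdrop : List.drop 3 ('n'::'i'::'n'::'e'::t) = 'e'::t := rfl
      have hscan : pvScanF ('n'::'i'::'n'::'e'::t) = [(9 : Int)] ++ pvScanF ('e'::t) := by
        rw [scanF_cons, tok_nine, scanF_cons, tok_in, scanF_cons, tok_ne]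
        simp
      rw [hv, hdrop, hscan]
      simp
  | case5 c rest acc hd h3 h4 h5 ih =>
    rcases pv_key5 _ (by simpa using h3) (by simpa using h4) h5 with htake | htake | htake
    · obtain ⟨t, ht⟩ : ∃ t, c :: rest = 't'::'h'::'r'::'e'::'e'::t := ⟨List.drop 5 (c :: rest), by
        conv_lhs => rw [← List.take_append_drop 5 (c :: rest)]
        rw [htake]
        rfl⟩
      injection ht with hc hrest
      subst hc; subst hrest
      rw [stepA_w5 _ _ _ hd h3 h4 h5, ih]
      have hv : (PySem.Dict.get? written_numbers (String.ofList (List.take 5 ('t'::'h'::'r'::'e'::'e'::t)))).getD 0 = (3 : Int) := by rfl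
      have hdrop : List.drop 4 ('t'::'h'::'r'::'e'::'e'::t) = 'e'::t := rfl
      have hscan : pvScanF ('t'::'h'::'r'::'e'::'e'::t) = [(3 : Int)] ++ pvScanF ('e'::t) := by
        rw [scanF_cons, tok_three, scanF_cons, tok_hr, scanF_cons, tok_re, scanF_cons, tok_ee]
        simp
      rw [hv, hdrop, hscan]
      simp
    · obtain ⟨t, ht⟩ : ∃ t, c :: rest = 's'::'e'::'v'::'e'::'n'::t := ⟨List.drop 5 (c :: rest), by
        conv_lhs => rw [← List.take_append_drop 5 (c :: rest)]
        rw [htake]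
        rfl⟩
      injection ht with hc hrest
      subst hc; subst hrest
      rw [stepA_w5 _ _ _ hd h3 h4 h5, ih]
      have hv : (PySem.Dict.get? written_numbers (String.ofList (List.take 5 ('s'::'e'::'v'::'e'::'n'::t)))).getD 0 = (7 : Int) := by rfl
      have hdrop : List.drop 4 ('s'::'e'::'v'::'e'::'n'::t) = 'n'::t := rfl
      have hscan : pvScanF ('s'::'e'::'v'::'e'::'n'::t) = [(7 : Int)] ++ pvScanF ('n'::t) := by
        rw [scanF_cons, tok_seven, scanF_cons, tok_ev, scanF_cons, tok_ve, scanF_cons, tok_en]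
        simp
      rw [hv, hdrop, hscan]
      simp
    · obtain ⟨t, ht⟩ : ∃ t, c :: rest = 'e'::'i'::'g'::'h'::'t'::t := ⟨List.drop 5 (c :: rest), by
        conv_lhs => rw [← List.take_append_drop 5 (c :: rest)]
        rw [htake]
        rfl⟩
      injection ht with hc hrest
      subst hc; subst hrest
      rw [stepA_w5 _ _ _ hd h3 h4 h5, ih]
      have hv : (PySem.Dict.get? written_numbers (String.ofList (List.take 5 ('e'::'i'::'g'::'h'::'t'::t)))).getD 0 = (8 : Int) := by rfl
      have hdrop : List.drop 4 ('e'::'i'::'g'::'h'::'t'::t) = 't'::t := rfl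
      have hscan : pvScanF ('e'::'i'::'g'::'h'::'t'::t) = [(8 : Int)] ++ pvScanF ('t'::t) := by
        rw [scanF_cons, tok_eight, scanF_cons, tok_ig, scanF_cons, tok_gh, scanF_cons, tok_ht]
        simp
      rw [hv, hdrop, hscan]
      simp
  | case6 c rest acc hd h3 h4 h5 ih =>
    rw [stepA_else _ _ _ hd h3 h4 h5, ih]
    have hd' : PySem.Chars.isdigit c = false := by simpa using hd
    have h3' : (PySem.Dict.get? written_numbers (String.ofList (List.take 3 (c :: rest)))).isSome = false := by simpa using h3
    have h4' : (PySem.Dict.get? written_numbers (String.ofList (List.take 4 (c :: rest)))).isSome = false := by simpa using h4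
    have h5' : (PySem.Dict.get? written_numbers (String.ofList (List.take 5 (c :: rest)))).isSome = false := by simpa using h5
    have hfind : (PySem.Dict.items written_numbers).find?
        (fun wv => PySem.Chars.startswith (c :: rest) wv.1.toList) = none := by
      rw [List.find?_eq_none]
      intro x hx
      fin_cases hx
      · simp [pv_no_sw (c :: rest) ['o', 'n', 'e'] (by rfl) h3']
      · simp [pv_no_sw (c :: rest) ['t', 'w', 'o'] (by rfl) h3']
      · simp [pv_no_sw (c :: rest) ['t', 'h', 'r', 'e', 'e'] (by rfl) h5']
      · simp [pv_no_sw (c :: rest) ['f', 'o', 'u', 'r'] (by rfl) h4']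
      · simp [pv_no_sw (c :: rest) ['f', 'i', 'v', 'e'] (by rfl) h4']
      · simp [pv_no_sw (c :: rest) ['s', 'i', 'x'] (by rfl) h3']
      · simp [pv_no_sw (c :: rest) ['s', 'e', 'v', 'e', 'n'] (by rfl) h5']
      · simp [pv_no_sw (c :: rest) ['e', 'i', 'g', 'h', 't'] (by rfl) h5']
      · simp [pv_no_sw (c :: rest) ['n', 'i', 'n', 'e'] (by rfl) h4']
    have htok : pvTokenB (c :: rest) = [] := by
      simp [pvTokenB, hd', hfind]
    rw [scanF_cons, htok]
    simp

-- ===== VERDICT (by name: the statement is the Claim_ definition above) =====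
theorem parse_numbers_in_line_py_spec : Claim_equal_parse_numbers_in_line_py := by
  intro line nums _
  unfold Spec_parse_numbers_in_line_py parse_numbers_in_line_py parse_numbers_in_line_py_alt
  rw [pvParseRecA_eq, pvScanB_eq]
  simp
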